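-- pv_equiv track=rewrite | github.com/Tim-Kirkwood/BulkProt | src/BulkProt/functions.py | remove_square_bracket_info
-- ===== SOURCE A (Python) =====
-- def remove_square_bracket_info(s, patterns = ['[Includes:', '[Cleaved into:']):
--     def find_delete_indicies(s, pattern):
--         open_bracket = False
--         internal_brackets = 0
--         delete_indicies = []
--         for i, c in enumerate(s):
--             if s[i:i+len(pattern)] == pattern:
--                 open_bracket = True
--             if open_bracket:
--                 if c == '[':
--                     internal_brackets += 1
--                 elif c == ']':
--                     internal_brackets -= 1
--                     if internal_brackets == 0:
--                         open_bracket = False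
--                         delete_indicies +=[i]#add final close bracket
--             #CODE SMELL - delete 'if open bracket' i think, then can also delete
--             #the extra 'delete indicies' add as it will be executred in the loop
--             if open_bracket:
--                 delete_indicies += [i]
--         assert not open_bracket
--         assert internal_brackets == 0
--         return delete_indicies
--
--     delete_indicies = []
--     for pattern in patterns:
--         delete_indicies += find_delete_indicies(s, pattern)
--     return ''.join([c for i, c in enumerate(s) if i not in delete_indicies]).strip()
-- ===== SOURCE B (Python) =====
-- def remove_square_bracket_info(s, patterns = ['[Includes:', '[Cleaved into:']):
--     # Single left-to-right scan: build the kept characters directly with an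
--     # inside-flag and a bracket-depth counter, never materialising delete indices.
--     kept = []
--     inside = False
--     depth = 0
--     for i, c in enumerate(s):
--         if not inside:
--             if any(s[i:i+len(p)] == p for p in patterns):
--                 inside = True
--         if inside:
--             if c == '[':
--                 depth += 1
--             elif c == ']':
--                 depth -= 1
--                 if depth == 0:
--                     inside = False
--         else:
--             kept.append(c)
--     return ''.join(kept).strip()
-- ===== Notes on version B (the rewrite author's own statement) =====
-- stated objective: alternative
-- what changed: A collects per-pattern lists of delete indices and then filters every character by list membership; B never materialises delete indices and instead builds the kept characters directly in one left-to-right scan with an inside-flag and a bracket-depth counter.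
-- outside the precondition, e.g. on remove_square_bracket_info('a[b][[]]', ['a', 'b']): A returns ']', B returns '[[]]'
import Mathlib
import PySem

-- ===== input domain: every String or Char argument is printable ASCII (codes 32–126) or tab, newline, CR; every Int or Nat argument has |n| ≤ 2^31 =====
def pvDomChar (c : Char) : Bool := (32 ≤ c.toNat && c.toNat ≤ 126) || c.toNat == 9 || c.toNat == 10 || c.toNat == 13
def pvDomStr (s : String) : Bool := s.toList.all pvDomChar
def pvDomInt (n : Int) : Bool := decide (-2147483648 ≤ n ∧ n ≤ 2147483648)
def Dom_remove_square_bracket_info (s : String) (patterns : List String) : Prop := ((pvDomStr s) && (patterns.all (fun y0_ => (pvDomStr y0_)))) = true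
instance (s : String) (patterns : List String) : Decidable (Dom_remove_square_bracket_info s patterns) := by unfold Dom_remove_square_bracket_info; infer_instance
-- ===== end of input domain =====

-- B replaces A's per-pattern delete-index lists + membership filter by one left-to-right
-- scan with an inside-flag and a bracket-depth counter that builds the kept text directly.


-- ===== PORT A =====
-- one iteration of find_delete_indicies's loop: pattern test, bracket handling, trailing append
def pvStepA (cs pat : List Char) (st : Bool × Int × List Int) (ic : Int × Char) : Bool × Int × List Int :=
  let ob := if PySem.List.slice cs (some ic.1) (some (ic.1 + (pat.length : Int))) = pat then true else st.1
  let st1 : Bool × Int × List Int :=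
    if ob then
      if ic.2 = '[' then (ob, st.2.1 + 1, st.2.2)
      else if ic.2 = ']' then
        if st.2.1 - 1 = 0 then (false, st.2.1 - 1, st.2.2 ++ [ic.1])
        else (ob, st.2.1 - 1, st.2.2)
      else (ob, st.2.1, st.2.2)
    else (ob, st.2.1, st.2.2)
  if st1.1 then (st1.1, st1.2.1, st1.2.2 ++ [ic.1]) else st1

-- find_delete_indicies(s, pattern); the two final asserts pass on every Pre_ input
def pvFindDelete (cs pat : List Char) : List Int :=
  ((PySem.List.enumerate cs 0).foldl (pvStepA cs pat) (false, 0, [])).2.2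

def remove_square_bracket_info (s : String) (patterns : List String) : String :=
  let cs := s.toList
  let del := patterns.foldl (fun acc p => acc ++ pvFindDelete cs p.toList) []
  PySem.Str.strip (String.ofList (((PySem.List.enumerate cs 0).filter
    (fun ic => !(del.contains ic.1))).map (·.2)))

-- ===== PORT B =====
-- one iteration of B's single scan: pattern test when outside, depth bookkeeping when inside,
-- keep the character only when outside ('s.startswith(p, i)' is ported exactly as s[i:i+len(p)] == p,
-- which it equals for 0 ≤ i)
def pvStepB (cs : List Char) (pats : List (List Char)) (st : Bool × Int × List Char) (ic : Int × Char) : Bool × Int × List Char :=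
  let inside := if st.1 then st.1
    else pats.any (fun p => PySem.List.slice cs (some ic.1) (some (ic.1 + (p.length : Int))) == p)
  if inside then
    if ic.2 = '[' then (inside, st.2.1 + 1, st.2.2)
    else if ic.2 = ']' then
      if st.2.1 - 1 = 0 then (false, st.2.1 - 1, st.2.2)
      else (inside, st.2.1 - 1, st.2.2)
    else (inside, st.2.1, st.2.2)
  else (inside, st.2.1, st.2.2 ++ [ic.2])

def remove_square_bracket_info_alt (s : String) (patterns : List String) : String :=
  let cs := s.toList
  PySem.Str.strip (String.ofList
    (((PySem.List.enumerate cs 0).foldl (pvStepB cs (patterns.map (·.toList))) (false, 0, [])).2.2))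

-- ===== PRECONDITION & SPEC =====
-- whether the pattern pat occurs in cs at position n (Python s[n:n+len(pat)] == pat)
def pvMatch (cs pat : List Char) (n : Nat) : Bool := (cs.drop n).take pat.length == pat

-- Pre_ excludes (i) inputs where some pattern occurs in s but does not start with '[' — the function
-- removes '[...]' sections, so the extent of a region opened by such a pattern is unspecified: A
-- usually raises AssertionError there, and where it does return the value is one of several defensible
-- readings of an unspecified corner — and (ii) inputs where the brackets after some pattern occurrence
-- never re-balance, on which A raises AssertionError.
def Pre_remove_square_bracket_info (s : String) (patterns : List String) : Prop :=
  (∀ p ∈ patterns, ∀ n < s.toList.length, pvMatch s.toList p.toList n = true →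
      p.toList.head? = some '[') ∧
  (∀ p ∈ patterns, ∀ n < s.toList.length, pvMatch s.toList p.toList n = true →
      ∃ j < s.toList.length, n ≤ j ∧
        ((s.toList.drop n).take (j + 1 - n)).count '[' = ((s.toList.drop n).take (j + 1 - n)).count ']')
instance (s : String) (patterns : List String) : Decidable (Pre_remove_square_bracket_info s patterns) := by
  unfold Pre_remove_square_bracket_info; infer_instance

def pvWitness_remove_square_bracket_info : String × List String :=
  ("keep [Includes: drop [this]] end", ["[Includes:", "[Cleaved into:"])

def Spec_remove_square_bracket_info (s : String) (patterns : List String) (out : String) : Prop := out = remove_square_bracket_info_alt s patterns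
instance (s : String) (patterns : List String) (out : String) : Decidable (Spec_remove_square_bracket_info s patterns out) := by unfold Spec_remove_square_bracket_info; infer_instance

-- ===== CLAIM (what is proved, stated in full; the proofs are below) =====
def Claim_equal_remove_square_bracket_info : Prop := ∀ (s : String) (patterns : List String), Dom_remove_square_bracket_info s patterns → Pre_remove_square_bracket_info s patterns → Spec_remove_square_bracket_info s patterns (remove_square_bracket_info s patterns)

-- ===== LEMMAS AND PROOFS =====

-- clean state recursions (proof-side views of the two scans' (flag, depth) state before step n)
def pvAStep (mt : Bool) (c : Char) (st : Bool × Int) : Bool × Int :=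
  let ob := if mt then true else st.1
  if ob then
    if c = '[' then (ob, st.2 + 1)
    else if c = ']' then (if st.2 - 1 = 0 then (false, st.2 - 1) else (ob, st.2 - 1))
    else (ob, st.2)
  else (ob, st.2)

def pvA (cs pat : List Char) : Nat → Bool × Int
  | 0 => (false, 0)
  | n + 1 => pvAStep (pvMatch cs pat n) (cs.getD n ' ') (pvA cs pat n)

def pvDropA (cs pat : List Char) (n : Nat) : Bool := (pvA cs pat n).1 || pvMatch cs pat n

def pvDelA (cs pat : List Char) : Nat → List Int
  | 0 => []
  | n + 1 => pvDelA cs pat n ++ (if pvDropA cs pat n then [(n : Int)] else [])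

def pvMAny (cs : List Char) (pats : List (List Char)) (n : Nat) : Bool :=
  pats.any (fun p => pvMatch cs p n)

def pvBStep (mAny : Bool) (c : Char) (st : Bool × Int) : Bool × Int :=
  let inside := if st.1 then st.1 else mAny
  if inside then
    if c = '[' then (inside, st.2 + 1)
    else if c = ']' then (if st.2 - 1 = 0 then (false, st.2 - 1) else (inside, st.2 - 1))
    else (inside, st.2)
  else (inside, st.2)

def pvB (cs : List Char) (pats : List (List Char)) : Nat → Bool × Int
  | 0 => (false, 0)
  | n + 1 => pvBStep (pvMAny cs pats n) (cs.getD n ' ') (pvB cs pats n)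

def pvDropB (cs : List Char) (pats : List (List Char)) (n : Nat) : Bool :=
  (pvB cs pats n).1 || pvMAny cs pats n

def pvKept (cs : List Char) (pats : List (List Char)) : Nat → List Char
  | 0 => []
  | n + 1 => pvKept cs pats n ++ (if pvDropB cs pats n then [] else [cs.getD n ' '])

-- the coupling invariant between B's single state and the family of A's per-pattern states
def pvInv (cs : List Char) (pats : List (List Char)) (n : Nat) : Prop :=
  ((pvB cs pats n).1 = false → (pvB cs pats n).2 = 0 ∧ ∀ p ∈ pats, pvA cs p n = (false, 0))
  ∧ ((pvB cs pats n).1 = true →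
      1 ≤ (pvB cs pats n).2
      ∧ (∃ p ∈ pats, (pvA cs p n).1 = true ∧ (pvA cs p n).2 = (pvB cs pats n).2)
      ∧ ∀ p ∈ pats, ((pvA cs p n).1 = true → 1 ≤ (pvA cs p n).2 ∧ (pvA cs p n).2 ≤ (pvB cs pats n).2)
                 ∧ ((pvA cs p n).1 = false → (pvA cs p n).2 = 0))


lemma take_enum_succ {α : Type} (xs : List α) (n : Nat) (h : n < xs.length) :
    PySem.List.enumerate (xs.take (n + 1)) 0 =
      PySem.List.enumerate (xs.take n) 0 ++ [((n : Int), xs[n])] := by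
  rw [List.take_succ, PySem.List.enumerate_append]
  simp [List.getElem?_eq_getElem h, PySem.List.enumerate_cons, min_eq_left (le_of_lt h)]

lemma stepA_eq (cs pat : List Char) (ob : Bool) (d : Int) (del : List Int) (n : Nat) (h : n < cs.length) :
    pvStepA cs pat (ob, d, del) ((n : Int), cs[n]) =
      ((pvAStep (pvMatch cs pat n) (cs.getD n ' ') (ob, d)).1,
       (pvAStep (pvMatch cs pat n) (cs.getD n ' ') (ob, d)).2,
       del ++ (if ob || pvMatch cs pat n then [(n : Int)] else [])) := by
  simp only [pvStepA, pvAStep, PySem.List.slice_natCast_add, pvMatch,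
    List.getD_eq_getElem?_getD, List.getElem?_eq_getElem h, Option.getD_some, beq_iff_eq]
  rcases ob with _ | _ <;> split_ifs <;> simp_all

lemma stA_spec (cs pat : List Char) (n : Nat) (h : n ≤ cs.length) :
    (PySem.List.enumerate (cs.take n) 0).foldl (pvStepA cs pat) (false, 0, []) =
      ((pvA cs pat n).1, (pvA cs pat n).2, pvDelA cs pat n) := by
  induction n with
  | zero => simp [pvA, pvDelA, PySem.List.enumerate_nil]
  | succ n ih =>
    have hn : n < cs.length := h
    rw [take_enum_succ cs n hn, List.foldl_append, ih (le_of_lt hn)]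
    simp only [List.foldl_cons, List.foldl_nil]
    rw [stepA_eq cs pat _ _ _ n hn]
    simp [pvA, pvDelA, pvDropA, List.getD_eq_getElem?_getD, List.getElem?_eq_getElem hn]

lemma stepB_eq (cs : List Char) (pats : List (List Char)) (ob : Bool) (d : Int) (kept : List Char) (n : Nat) (h : n < cs.length) :
    pvStepB cs pats (ob, d, kept) ((n : Int), cs[n]) =
      ((pvBStep (pvMAny cs pats n) (cs.getD n ' ') (ob, d)).1,
       (pvBStep (pvMAny cs pats n) (cs.getD n ' ') (ob, d)).2,
       kept ++ (if ob || pvMAny cs pats n then [] else [cs[n]])) := by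
  simp only [pvStepB, pvBStep, pvMAny, PySem.List.slice_natCast_add, pvMatch,
    List.getD_eq_getElem?_getD, List.getElem?_eq_getElem h, Option.getD_some]
  rcases ob with _ | _ <;> split_ifs <;> simp_all <;> tauto

lemma stB_spec (cs : List Char) (pats : List (List Char)) (n : Nat) (h : n ≤ cs.length) :
    (PySem.List.enumerate (cs.take n) 0).foldl (pvStepB cs pats) (false, 0, []) =
      ((pvB cs pats n).1, (pvB cs pats n).2, pvKept cs pats n) := by
  induction n with
  | zero => simp [pvB, pvKept, PySem.List.enumerate_nil]
  | succ n ih =>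
    have hn : n < cs.length := h
    rw [take_enum_succ cs n hn, List.foldl_append, ih (le_of_lt hn)]
    simp only [List.foldl_cons, List.foldl_nil]
    rw [stepB_eq cs pats _ _ _ n hn]
    simp [pvB, pvKept, pvDropB, List.getD_eq_getElem?_getD, List.getElem?_eq_getElem hn]

lemma mem_delA (cs pat : List Char) (n : Nat) (x : Int) :
    x ∈ pvDelA cs pat n ↔ ∃ m < n, x = (m : Int) ∧ pvDropA cs pat m = true := by
  induction n with
  | zero => simp [pvDelA]
  | succ n ih =>
    simp only [pvDelA, List.mem_append, ih]
    constructor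
    · rintro (⟨m, hm, rfl, hd⟩ | hx)
      · exact ⟨m, by omega, rfl, hd⟩
      · split_ifs at hx with hd
        · simp at hx; exact ⟨n, by omega, hx, hd⟩
        · simp at hx
    · rintro ⟨m, hm, rfl, hd⟩
      rcases Nat.lt_succ_iff_lt_or_eq.mp hm with h | rfl
      · exact Or.inl ⟨m, h, rfl, hd⟩
      · right; simp [hd]

lemma match_bracket (cs pat : List Char) (n : Nat)
    (hm : pvMatch cs pat n = true) (hh : pat.head? = some '[') : cs.getD n ' ' = '[' := by
  simp only [pvMatch, beq_iff_eq] at hm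
  cases e : cs.drop n with
  | nil => rw [e] at hm; cases pat <;> simp_all
  | cons a as =>
    cases pat with
    | nil => simp at hh
    | cons b bs =>
      rw [e] at hm
      simp [List.take_succ_cons] at hm
      obtain ⟨rfl, -⟩ := hm
      simp at hh
      have : cs[n]? = some a := by
        have := (List.getElem?_drop (xs := cs) (i := n) (j := 0)).symm
        rw [e] at this; simpa using this
      simp [List.getD_eq_getElem?_getD, this, hh]

lemma inv_holds (cs : List Char) (pats : List (List Char))
    (H1 : ∀ p ∈ pats, ∀ m < cs.length, pvMatch cs p m = true → p.head? = some '[')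
    (n : Nat) : n ≤ cs.length → pvInv cs pats n := by
  induction n with
  | zero =>
    intro _
    constructor
    · intro _; exact ⟨rfl, fun p _ => rfl⟩
    · intro hcon; simp [pvB] at hcon
  | succ n ih =>
    intro h
    have hn : n < cs.length := h
    have INV := ih (Nat.le_of_lt hn)
    have hbr : ∀ p ∈ pats, pvMatch cs p n = true → cs.getD n ' ' = '[' :=
      fun p hp hm => match_bracket cs p n hm (H1 p hp n hn hm)
    simp only [List.getD_eq_getElem?_getD] at hbr
    by_cases hB : (pvB cs pats n).1 = true
    · -- inside a region
      obtain ⟨hd1, ⟨p0, hp0, hop0, hdp0⟩, hbounds⟩ := INV.2 hB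
      by_cases hc1 : cs[n]?.getD ' ' = '['
      · -- opening bracket: depths go up
        have hBsucc : pvB cs pats (n+1) = (true, (pvB cs pats n).2 + 1) := by
          simp [pvB, pvBStep, hB, hc1]
        constructor
        · intro hf; rw [hBsucc] at hf; simp at hf
        · intro _
          rw [hBsucc]
          refine ⟨by omega, ⟨p0, hp0, ?_⟩, ?_⟩
          · have : pvA cs p0 (n+1) = (true, (pvA cs p0 n).2 + 1) := by
              by_cases hm : pvMatch cs p0 n = true <;> simp [pvA, pvAStep, hop0, hm, hc1]
            rw [this]; exact ⟨rfl, by rw [hdp0]⟩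
          · intro p hp
            by_cases hob : (pvA cs p n).1 = true
            · have : pvA cs p (n+1) = (true, (pvA cs p n).2 + 1) := by
                by_cases hm : pvMatch cs p n = true <;> simp [pvA, pvAStep, hob, hm, hc1]
              rw [this]
              have hb := (hbounds p hp).1 hob
              exact ⟨fun _ => ⟨by omega, by omega⟩, by simp⟩
            · have hob' : (pvA cs p n).1 = false := by simpa using hob
              have hz := (hbounds p hp).2 hob'
              by_cases hm : pvMatch cs p n = true
              · have : pvA cs p (n+1) = (true, (pvA cs p n).2 + 1) := by
                  simp [pvA, pvAStep, hob', hm, hc1]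
                rw [this]
                exact ⟨fun _ => ⟨by omega, by omega⟩, by simp⟩
              · have : pvA cs p (n+1) = (false, (pvA cs p n).2) := by
                  simp [pvA, pvAStep, hob', hm, hc1]
                rw [this]
                exact ⟨by simp, fun _ => hz⟩
      · -- not an opening bracket: no pattern matches here
        have hnom : ∀ p ∈ pats, pvMatch cs p n = false := by
          intro p hp
          by_contra hm
          exact hc1 (hbr p hp (by simpa using hm))
        have hA_step : ∀ p ∈ pats, pvA cs p (n+1) = pvAStep false (cs.getD n ' ') (pvA cs p n) := by
          intro p hp; simp [pvA, hnom p hp]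
        by_cases hc2 : cs[n]?.getD ' ' = ']'
        · by_cases hz : (pvB cs pats n).2 - 1 = 0
          · -- region closes for B and for every open pattern
            have hBsucc : pvB cs pats (n+1) = (false, 0) := by
              simp [pvB, pvBStep, hB, hc1, hc2, hz]
            constructor
            · intro _
              rw [hBsucc]
              refine ⟨rfl, fun p hp => ?_⟩
              rw [hA_step p hp]
              by_cases hob : (pvA cs p n).1 = true
              · have hb := (hbounds p hp).1 hob
                have : (pvA cs p n).2 = 1 := by omega
                simp [pvAStep, hob, hc1, hc2, this]
              · have hob' : (pvA cs p n).1 = false := by simpa using hob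
                have hz2 := (hbounds p hp).2 hob'
                simp [pvAStep, hob', hc1, hc2, hz2]
            · intro hcon; rw [hBsucc] at hcon; simp at hcon
          · -- depth just decreases
            have hBsucc : pvB cs pats (n+1) = (true, (pvB cs pats n).2 - 1) := by
              simp [pvB, pvBStep, hB, hc1, hc2, hz]
            have hd2 : 2 ≤ (pvB cs pats n).2 := by omega
            constructor
            · intro hf; rw [hBsucc] at hf; simp at hf
            · intro _
              rw [hBsucc]
              have hp0d : pvA cs p0 (n+1) = (true, (pvA cs p0 n).2 - 1) := by
                rw [hA_step p0 hp0]
                have : ¬ ((pvA cs p0 n).2 - 1 = 0) := by rw [hdp0]; omega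
                simp [pvAStep, hop0, hc1, hc2, this]
              refine ⟨by omega, ⟨p0, hp0, by rw [hp0d], by rw [hp0d, hdp0]⟩, ?_⟩
              intro p hp
              by_cases hob : (pvA cs p n).1 = true
              · have hb := (hbounds p hp).1 hob
                by_cases hzp : (pvA cs p n).2 - 1 = 0
                · have hstep : pvA cs p (n+1) = (false, (pvA cs p n).2 - 1) := by
                    rw [hA_step p hp]; simp [pvAStep, hob, hc1, hc2, hzp]
                  rw [hstep]
                  exact ⟨by simp, fun _ => by simpa using by omega⟩
                · have hstep : pvA cs p (n+1) = (true, (pvA cs p n).2 - 1) := by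
                    rw [hA_step p hp]; simp [pvAStep, hob, hc1, hc2, hzp]
                  rw [hstep]
                  exact ⟨fun _ => ⟨by omega, by omega⟩, by simp⟩
              · have hob' : (pvA cs p n).1 = false := by simpa using hob
                have hz2 := (hbounds p hp).2 hob'
                have hstep : pvA cs p (n+1) = (false, (pvA cs p n).2) := by
                  rw [hA_step p hp]; simp [pvAStep, hob', hc1, hc2]
                rw [hstep]
                exact ⟨by simp, fun _ => hz2⟩
        · -- ordinary character: nothing changes
          have hBsucc : pvB cs pats (n+1) = (true, (pvB cs pats n).2) := by
            simp [pvB, pvBStep, hB, hc1, hc2]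
          constructor
          · intro hf; rw [hBsucc] at hf; simp at hf
          · intro _
            rw [hBsucc]
            have hstep : ∀ p ∈ pats, pvA cs p (n+1) = pvA cs p n := by
              intro p hp
              rw [hA_step p hp]
              by_cases hob : (pvA cs p n).1 = true
              · simp [pvAStep, hob, hc1, hc2]
                exact Prod.ext hob.symm rfl
              · have hob' : (pvA cs p n).1 = false := by simpa using hob
                simp [pvAStep, hob', hc1, hc2]
                exact Prod.ext hob'.symm rfl
            refine ⟨hd1, ⟨p0, hp0, ?_⟩, ?_⟩
            · rw [hstep p0 hp0]; exact ⟨hop0, hdp0⟩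
            · intro p hp
              rw [hstep p hp]
              exact hbounds p hp
    · -- outside all regions
      have hB' : (pvB cs pats n).1 = false := by simpa using hB
      obtain ⟨hd0, hall⟩ := INV.1 hB'
      by_cases hM : pvMAny cs pats n = true
      · -- a pattern matches: everything opens at depth 1
        obtain ⟨p0, hp0, hm0⟩ := List.any_eq_true.mp hM
        have hc1 : cs[n]?.getD ' ' = '[' := hbr p0 hp0 hm0
        have hBsucc : pvB cs pats (n+1) = (true, 1) := by
          have hM' : (pats.any fun p => pvMatch cs p n) = true :=
            List.any_eq_true.mpr ⟨p0, hp0, hm0⟩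
          simp [pvB, pvBStep, pvMAny, hB', hd0, hc1, hM']
        have hA_case : ∀ p ∈ pats, pvA cs p (n+1) =
            (if pvMatch cs p n then (true, 1) else (false, 0)) := by
          intro p hp
          by_cases hm : pvMatch cs p n = true <;>
            simp [pvA, pvAStep, hall p hp, hm, hc1]
        constructor
        · intro hf; rw [hBsucc] at hf; simp at hf
        · intro _
          rw [hBsucc]
          refine ⟨by norm_num, ⟨p0, hp0, by rw [hA_case p0 hp0, if_pos hm0], by rw [hA_case p0 hp0, if_pos hm0]⟩, ?_⟩
          intro p hp
          rw [hA_case p hp]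
          by_cases hm : pvMatch cs p n = true
          · rw [if_pos hm]; exact ⟨fun _ => by norm_num, by simp⟩
          · rw [if_neg (by simpa using hm)]; simp
      · -- nothing matches: stay outside
        have hM' : pvMAny cs pats n = false := by simpa using hM
        have hBsucc : pvB cs pats (n+1) = (false, 0) := by
          simp [pvB, pvBStep, hB', hd0, hM']
        have hnom : ∀ p ∈ pats, pvMatch cs p n = false := by
          intro p hp
          have := List.any_eq_false.mp (by simpa [pvMAny] using hM') p hp
          simpa using this
        constructor
        · intro _
          rw [hBsucc]
          refine ⟨rfl, fun p hp => ?_⟩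
          simp [pvA, pvAStep, hall p hp, hnom p hp]
        · intro hcon; rw [hBsucc] at hcon; simp at hcon

lemma drop_eq (cs : List Char) (pats : List (List Char))
    (H1 : ∀ p ∈ pats, ∀ m < cs.length, pvMatch cs p m = true → p.head? = some '[')
    (n : Nat) (h : n < cs.length) :
    pvDropB cs pats n = true ↔ ∃ p ∈ pats, pvDropA cs p n = true := by
  have INV := inv_holds cs pats H1 n (Nat.le_of_lt h)
  unfold pvDropB pvDropA
  simp only [Bool.or_eq_true]
  constructor
  · rintro (hb | hm)
    · obtain ⟨p, hp, hop, -⟩ := (INV.2 hb).2.1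
      exact ⟨p, hp, Or.inl hop⟩
    · obtain ⟨p, hp, hmp⟩ := List.any_eq_true.mp hm
      exact ⟨p, hp, Or.inr hmp⟩
  · rintro ⟨p, hp, hop | hmp⟩
    · left
      by_contra hb
      have hb' : (pvB cs pats n).1 = false := by simpa using hb
      have := (INV.1 hb').2 p hp
      rw [this] at hop; simp at hop
    · right
      exact List.any_eq_true.mpr ⟨p, hp, hmp⟩

lemma kept_eq (cs : List Char) (pats : List (List Char))
    (H1 : ∀ p ∈ pats, ∀ m < cs.length, pvMatch cs p m = true → p.head? = some '[')
    (del : List Int)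
    (hdel : ∀ x : Int, x ∈ del ↔ ∃ p ∈ pats, x ∈ pvDelA cs p cs.length)
    (n : Nat) (h : n ≤ cs.length) :
    ((PySem.List.enumerate (cs.take n) 0).filter (fun ic => !(del.contains ic.1))).map (·.2) =
      pvKept cs pats n := by
  induction n with
  | zero => simp [pvKept, PySem.List.enumerate_nil]
  | succ n ih =>
    have hn : n < cs.length := h
    rw [take_enum_succ cs n hn, List.filter_append, List.map_append, ih (Nat.le_of_lt hn)]
    have hmem : ((n : Int) ∈ del) ↔ pvDropB cs pats n = true := by
      rw [hdel]
      constructor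
      · rintro ⟨p, hp, hx⟩
        obtain ⟨m, -, hm, hd⟩ := (mem_delA cs p cs.length ((n : Int))).mp hx
        have hmn : m = n := by exact_mod_cast hm.symm
        rw [hmn] at hd
        exact (drop_eq cs pats H1 n hn).mpr ⟨p, hp, hd⟩
      · intro hd
        obtain ⟨p, hp, hdp⟩ := (drop_eq cs pats H1 n hn).mp hd
        exact ⟨p, hp, (mem_delA cs p cs.length _).mpr ⟨n, hn, rfl, hdp⟩⟩
    have hget : cs.getD n ' ' = cs[n] := by
      simp [List.getD_eq_getElem?_getD, List.getElem?_eq_getElem hn]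
    rcases hd : pvDropB cs pats n with _ | _
    · have hnotmem : ¬ ((n : Int) ∈ del) := fun hc => by simp [hmem.mp hc] at hd
      simp [pvKept, hd, List.filter_cons, hnotmem, hget, List.getElem?_eq_getElem hn]
    · have hm : ((n : Int) ∈ del) := hmem.mpr hd
      simp [pvKept, hd, List.filter_cons, hm]

lemma findDelete_eq (cs pat : List Char) :
    pvFindDelete cs pat = pvDelA cs pat cs.length := by
  have := stA_spec cs pat cs.length le_rfl
  rw [List.take_length] at this
  unfold pvFindDelete
  rw [this]

-- ===== VERDICT (by name: the statement is the Claim_ definition above) =====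
theorem remove_square_bracket_info_spec : Claim_equal_remove_square_bracket_info := by
  unfold Claim_equal_remove_square_bracket_info
  intro s patterns _ hpre
  unfold Spec_remove_square_bracket_info remove_square_bracket_info remove_square_bracket_info_alt
  have H1 : ∀ p ∈ patterns.map (·.toList), ∀ m < s.toList.length,
      pvMatch s.toList p m = true → p.head? = some '[' := by
    intro p hp
    obtain ⟨q, hq, rfl⟩ := List.mem_map.mp hp
    exact hpre.1 q hq
  have hdel : ∀ x : Int,
      x ∈ patterns.foldl (fun acc p => acc ++ pvFindDelete s.toList p.toList) [] ↔
        ∃ p ∈ patterns.map (·.toList), x ∈ pvDelA s.toList p s.toList.length := by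
    intro x
    rw [PySem.List.foldl_append_eq_flatMap]
    simp only [List.nil_append, List.mem_flatMap, List.mem_map]
    constructor
    · rintro ⟨q, hq, hx⟩
      exact ⟨q.toList, ⟨q, hq, rfl⟩, by rwa [findDelete_eq] at hx⟩
    · rintro ⟨p, ⟨q, hq, rfl⟩, hx⟩
      exact ⟨q, hq, by rwa [findDelete_eq]⟩
  have hA := kept_eq s.toList (patterns.map (·.toList)) H1 _ hdel s.toList.length le_rfl
  rw [List.take_length] at hA
  have hB := stB_spec s.toList (patterns.map (·.toList)) s.toList.length le_rfl
  rw [List.take_length] at hB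
  dsimp only
  rw [hB, hA]
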